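-- pv_equiv track=rewrite | github.com/EimonRUETCSE/Machine-Learning | Genetic Algorithm/Genetic.py | maximumCalculation
-- ===== SOURCE A (Python) =====
-- def valueCalculation(Input,i):
--     s = 0;
--     j = 0;
--     l = len(Input[i]);
--     j = 0;
--     while(j<l):
--         s = s + (2**(l-j-1)) * (ord(Input[i][j])-48);
--         j = j+1;
--     return s;
--
-- def maximumCalculation(Input):
--     l = len(Input);
--     j = 0;
--     M = -10;
--     while(j<l):
--         v = valueCalculation(Input,j);
--         if(v>M):
--             M = v;
--             location = j;
--         j = j + 1;
--     return M,location;
-- ===== SOURCE B (Python) =====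
-- def _decode(s):
--     # right-to-left decode with a running power of two (no exponentiation)
--     v = 0
--     p = 1
--     for c in reversed(s):
--         v += p * (ord(c) - 48)
--         p *= 2
--     return v
--
-- def _best(vals, lo, hi):
--     # first maximum of vals[lo:hi] as (value, index), by divide and conquer;
--     # ties go to the left half, so the first maximum wins
--     if hi - lo == 1:
--         return vals[lo], lo
--     mid = (lo + hi) // 2
--     left = _best(vals, lo, mid)
--     right = _best(vals, mid, hi)
--     return left if left[0] >= right[0] else right
--
-- def maximumCalculation(Input):
--     vals = [_decode(s) for s in Input]
--     return _best(vals, 0, len(vals))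
-- ===== Notes on version B (the rewrite author's own statement) =====
-- stated objective: alternative
-- what changed: Replaces A's two index-driven while loops (per-char power 2**(l-j-1) and a sequential running-max scan) by a right-to-left decode with a running power of two and a divide-and-conquer recursion over index ranges that merges half-results with ties going left, so the first maximum wins without any sequential max state.
-- crash fix: On a non-empty Input all of whose decoded values are <= -10 (the -10 sentinel is never beaten), A raises UnboundLocalError (location unbound) while B returns the true maximum and its first index; on empty Input both raise. — e.g. on maximumCalculation([" "]): A raises UnboundLocalError, B returns (-16, 0)
import Mathlib
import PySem

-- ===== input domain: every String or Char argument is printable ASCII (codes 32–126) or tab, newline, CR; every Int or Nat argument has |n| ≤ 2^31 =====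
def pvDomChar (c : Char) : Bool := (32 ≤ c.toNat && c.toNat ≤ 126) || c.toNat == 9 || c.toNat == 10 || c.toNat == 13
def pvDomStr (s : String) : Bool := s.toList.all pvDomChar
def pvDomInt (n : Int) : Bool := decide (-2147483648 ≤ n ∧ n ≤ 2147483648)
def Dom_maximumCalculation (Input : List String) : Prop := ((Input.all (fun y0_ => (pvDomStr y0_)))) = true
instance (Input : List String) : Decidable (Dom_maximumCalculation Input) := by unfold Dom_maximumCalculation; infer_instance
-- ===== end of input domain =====

-- B replaces A's two sequential while loops by a right-to-left running-power decode and a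
-- divide-and-conquer first-maximum over index ranges (ties merge left); same cost, no running-max state.

-- ===== PORT A =====
-- inner while loop of valueCalculation: s += 2**(l-j-1) * (ord(Input[i][j]) - 48)
def vcLoop (cs : List Char) (l : Nat) (j : Nat) (s : Int) : Int :=
  if j < l then
    vcLoop cs l (j + 1) (s + 2 ^ (l - j - 1) * (((cs.getD j ' ').toNat : Int) - 48))
  else s
termination_by l - j

def valueCalculation (Input : List String) (i : Nat) : Int :=
  let cs := (Input.getD i "").toList
  vcLoop cs cs.length 0 0

-- outer while loop: running max M (init -10) and its location, strict '>' keeps the first maximum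
def mcLoop (Input : List String) (l : Nat) (j : Nat) (M : Int) (loc : Int) : Int × Int :=
  if j < l then
    let v := valueCalculation Input j
    if v > M then mcLoop Input l (j + 1) v (j : Int)
    else mcLoop Input l (j + 1) M loc
  else (M, loc)
termination_by l - j

def maximumCalculation (Input : List String) : Int × Int :=
  mcLoop Input Input.length 0 (-10) 0    -- loc initialised only for totality: Python raises where it is never set (outside Pre_)

-- ===== PORT B =====
-- right-to-left decode with a running power of two (B's _decode)
def revDecode (s : String) : Int :=
  (s.toList.reverse.foldl
    (fun (vp : Int × Int) c => (vp.1 + vp.2 * ((c.toNat : Int) - 48), vp.2 * 2)) (0, 1)).1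

-- B's _best: first maximum of vals[lo:hi] by divide and conquer, ties to the left half.
-- (Python diverges when hi = lo; that range is never reached from a non-empty call, outside Pre_.)
def bestDC (vals : List Int) (lo hi : Nat) : Int × Nat :=
  if hi ≤ lo + 1 then (vals.getD lo 0, lo)
  else
    let mid := (lo + hi) / 2
    let left := bestDC vals lo mid
    let right := bestDC vals mid hi
    if left.1 ≥ right.1 then left else right
termination_by hi - lo
decreasing_by all_goals omega

def maximumCalculation_alt (Input : List String) : Int × Int :=
  let vals := Input.map revDecode
  let r := bestDC vals 0 vals.length
  (r.1, (r.2 : Int))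

-- ===== PRECONDITION & SPEC =====
-- Pre_ excludes exactly the inputs on which A raises UnboundLocalError: no string decodes above
-- the -10 sentinel, so 'location' is never assigned (this includes the empty list).
def Pre_maximumCalculation (Input : List String) : Prop :=
  ∃ s ∈ Input, -10 < revDecode s
instance (Input : List String) : Decidable (Pre_maximumCalculation Input) := by unfold Pre_maximumCalculation; infer_instance

def pvWitness_maximumCalculation : List String := (["101", "0"])

-- On a non-empty Input all of whose decoded values are ≤ -10, A raises UnboundLocalError while B returns the maximum and its first index.
def Raises_maximumCalculation (Input : List String) : Prop :=
  Input ≠ [] ∧ ∀ s ∈ Input, revDecode s ≤ -10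
instance (Input : List String) : Decidable (Raises_maximumCalculation Input) := by unfold Raises_maximumCalculation; infer_instance
def pvRaiseWitness_maximumCalculation : List String := ([" "])
def pvRaiseWitnessOut_maximumCalculation : Int × Int := (-16, 0)

def Spec_maximumCalculation (Input : List String) (out : Int × Int) : Prop := out = maximumCalculation_alt Input
instance (Input : List String) (out : Int × Int) : Decidable (Spec_maximumCalculation Input out) := by unfold Spec_maximumCalculation; infer_instance

-- ===== CLAIM =====
def Claim_equal_maximumCalculation : Prop := ∀ (Input : List String), Dom_maximumCalculation Input → Pre_maximumCalculation Input → Spec_maximumCalculation Input (maximumCalculation Input)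
def Claim_raises_maximumCalculation : Prop := (∀ (Input : List String), Dom_maximumCalculation Input → Raises_maximumCalculation Input → ¬ Pre_maximumCalculation Input) ∧ (Dom_maximumCalculation (pvRaiseWitness_maximumCalculation) ∧ Raises_maximumCalculation (pvRaiseWitness_maximumCalculation) ∧ maximumCalculation_alt (pvRaiseWitness_maximumCalculation) = pvRaiseWitnessOut_maximumCalculation)

-- ===== LEMMAS AND PROOFS =====

-- positional-power sum of a char list, structurally
def polyDec : List Char → Int
  | [] => 0
  | c :: t => ((c.toNat : Int) - 48) * 2 ^ t.length + polyDec t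

lemma vcLoop_eq (cs : List Char) : ∀ n j s, j + n = cs.length →
    vcLoop cs cs.length j s = s + polyDec (cs.drop j) := by
  intro n
  induction n with
  | zero =>
    intro j s h
    have hd : List.drop j cs = [] := List.drop_of_length_le (by omega)
    rw [vcLoop, if_neg (by omega), hd]
    simp [polyDec]
  | succ n ih =>
    intro j s h
    have hj : j < cs.length := by omega
    rw [vcLoop]
    simp only [hj, if_pos]
    rw [ih (j + 1) _ (by omega)]
    rw [List.drop_eq_getElem_cons hj, polyDec]
    rw [List.getD_eq_getElem cs ' ' hj]
    have : (cs.drop (j + 1)).length = cs.length - j - 1 := by simp; omega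
    rw [this]
    ring

lemma revFold_eq (cs : List Char) : ∀ v p : Int,
    cs.reverse.foldl
      (fun (vp : Int × Int) c => (vp.1 + vp.2 * ((c.toNat : Int) - 48), vp.2 * 2)) (v, p)
      = (v + p * polyDec cs, p * 2 ^ cs.length) := by
  induction cs with
  | nil => intro v p; simp [polyDec]
  | cons c t ih =>
    intro v p
    simp only [List.reverse_cons, List.foldl_append, ih, List.foldl_cons, List.foldl_nil,
      polyDec, List.length_cons, Prod.mk.injEq]
    constructor <;> ring

lemma revDecode_eq (s : String) : revDecode s = polyDec s.toList := by
  unfold revDecode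
  rw [revFold_eq]
  simp

lemma valueCalculation_eq (Input : List String) (i : Nat) :
    valueCalculation Input i = revDecode (Input.getD i "") := by
  unfold valueCalculation
  rw [vcLoop_eq _ (Input.getD i "").toList.length 0 0 (by omega), revDecode_eq]
  simp

-- first-maximum-with-index of a value list, structurally from the front
def best : List Int → Option (Int × Nat)
  | [] => none
  | v :: t =>
    match best t with
    | none => some (v, 0)
    | some (m, i) => if m > v then some (m, i + 1) else some (v, 0)

lemma best_eq_none_iff (vs : List Int) : best vs = none ↔ vs = [] := by
  cases vs with
  | nil => simp [best]
  | cons v t =>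
    cases h : best t with
    | none => simp [best, h]
    | some p =>
      obtain ⟨m, i⟩ := p
      simp only [best, h]
      split_ifs <;> simp

lemma best_max {vs : List Int} {m : Int} {i : Nat} (h : best vs = some (m, i)) :
    ∀ v ∈ vs, v ≤ m := by
  induction vs generalizing m i with
  | nil => simp [best] at h
  | cons v t ih =>
    cases ht : best t with
    | none =>
      have : t = [] := (best_eq_none_iff t).mp ht
      subst this
      simp only [best] at h
      injection h with h'; injection h' with h1 h2
      subst h1
      simp
    | some p =>
      obtain ⟨mt, it⟩ := p
      simp only [best, ht] at h
      have hmax := ih (m := mt) (i := it) ht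
      split_ifs at h with hgt <;>
      · injection h with h'; injection h' with h1 h2
        subst h1
        intro x hx
        rcases List.mem_cons.mp hx with rfl | hx
        · omega
        · have := hmax x hx; omega

lemma best_index {vs : List Int} {m : Int} {i : Nat} (h : best vs = some (m, i)) :
    ∃ (hi : i < vs.length), vs[i] = m ∧ ∀ k (hk : k < i), vs[k]'(by omega) < m := by
  induction vs generalizing m i with
  | nil => simp [best] at h
  | cons v t ih =>
    cases ht : best t with
    | none =>
      have hnil : t = [] := (best_eq_none_iff t).mp ht
      subst hnil
      simp only [best] at h
      injection h with h'; injection h' with h1 h2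
      subst h1; subst h2
      exact ⟨by simp, by simp, by omega⟩
    | some p =>
      obtain ⟨mt, it⟩ := p
      simp only [best, ht] at h
      obtain ⟨hit, hval, hfirst⟩ := ih (m := mt) (i := it) ht
      split_ifs at h with hgt <;> injection h with h' <;> injection h' with h1 h2 <;>
        subst h1 <;> subst h2
      · refine ⟨by simp; omega, by simpa using hval, ?_⟩
        intro k hk
        cases k with
        | zero => simpa using hgt
        | succ k' => simpa using hfirst k' (by omega)
      · exact ⟨by simp, by simp, by omega⟩

-- A's outer loop computed on the list of decoded values
def loopVals : List Int → Nat → Int → Int → Int × Int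
  | [], _, M, loc => (M, loc)
  | v :: t, j, M, loc =>
    if v > M then loopVals t (j + 1) v (j : Int) else loopVals t (j + 1) M loc

lemma mcLoop_eq_loopVals (Input : List String) : ∀ n j M loc, j + n = Input.length →
    mcLoop Input Input.length j M loc =
      loopVals ((Input.map revDecode).drop j) j M loc := by
  intro n
  induction n with
  | zero =>
    intro j M loc h
    have hd : (Input.map revDecode).drop j = [] :=
      List.drop_of_length_le (by simp; omega)
    rw [mcLoop, if_neg (by omega), hd]
    rfl
  | succ n ih =>
    intro j M loc h
    have hj : j < Input.length := by omega
    rw [mcLoop]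
    simp only [hj, if_pos]
    have hd : (Input.map revDecode).drop j =
        revDecode Input[j] :: (Input.map revDecode).drop (j + 1) := by
      rw [List.drop_eq_getElem_cons (by simpa using hj)]
      simp
    rw [hd, loopVals, valueCalculation_eq, List.getD_eq_getElem Input "" hj]
    split_ifs with hgt
    · rw [ih (j + 1) _ _ (by omega)]
    · rw [ih (j + 1) _ _ (by omega)]

lemma loopVals_eq_best (vs : List Int) : ∀ j M loc,
    loopVals vs j M loc =
      match best vs with
      | none => (M, loc)
      | some (m, i) => if m > M then (m, ((j + i : Nat) : Int)) else (M, loc) := by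
  induction vs with
  | nil => intro j M loc; simp [loopVals, best]
  | cons v t ih =>
    intro j M loc
    cases ht : best t with
    | none =>
      have : t = [] := (best_eq_none_iff t).mp ht
      subst this
      simp only [loopVals, best]
      split_ifs <;> simp
    | some p =>
      obtain ⟨mt, it⟩ := p
      simp only [loopVals, best, ht]
      rw [ih, ih, ht]
      by_cases h2 : mt > v
      · by_cases h1 : v > M
        · have h3 : mt > M := by omega
          simp only [if_pos h1, if_pos h2]
          simp only [if_pos h3]
          congr 1
          omega
        · simp only [if_neg h1, if_pos h2]
          rw [show j + 1 + it = j + (it + 1) from by omega]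
      · by_cases h1 : v > M
        · simp only [if_pos h1, if_neg h2]
          congr 1
        · have h3 : ¬ mt > M := by omega
          simp only [if_neg h1, if_neg h2]
          simp only [if_neg h3]

lemma best_some_of_mem {vs : List Int} {v : Int} (hv : v ∈ vs) :
    ∃ m i, best vs = some (m, i) ∧ v ≤ m := by
  cases h : best vs with
  | none =>
    rw [best_eq_none_iff] at h
    subst h; simp at hv
  | some p =>
    obtain ⟨m, i⟩ := p
    exact ⟨m, i, rfl, best_max h v hv⟩

-- bestDC returns the first maximum of the range [lo,hi): its index is in range, it attains
-- its value, everything before it in the range is strictly smaller, everything in range is ≤ it.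
lemma bestDC_spec (vals : List Int) : ∀ n lo hi, hi - lo ≤ n → lo < hi → hi ≤ vals.length →
    lo ≤ (bestDC vals lo hi).2 ∧ (bestDC vals lo hi).2 < hi ∧
    vals.getD (bestDC vals lo hi).2 0 = (bestDC vals lo hi).1 ∧
    (∀ k, lo ≤ k → k < (bestDC vals lo hi).2 → vals.getD k 0 < (bestDC vals lo hi).1) ∧
    (∀ k, lo ≤ k → k < hi → vals.getD k 0 ≤ (bestDC vals lo hi).1) := by
  intro n
  induction n with
  | zero => intro lo hi h1 h2 h3; omega
  | succ n ih =>
    intro lo hi h1 h2 h3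
    by_cases hbase : hi ≤ lo + 1
    · rw [bestDC, if_pos hbase]
      refine ⟨le_refl _, by omega, rfl, by omega, ?_⟩
      intro k hk1 hk2
      have : k = lo := by omega
      subst this; exact le_refl _
    · rw [bestDC, if_neg hbase]
      set mid := (lo + hi) / 2 with hmid
      have hlm : lo < mid := by omega
      have hmh : mid < hi := by omega
      obtain ⟨l1, l2, l3, l4, l5⟩ := ih lo mid (by omega) hlm (by omega)
      obtain ⟨r1, r2, r3, r4, r5⟩ := ih mid hi (by omega) hmh h3
      by_cases hge : (bestDC vals lo mid).1 ≥ (bestDC vals mid hi).1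
      · simp only [if_pos hge]
        refine ⟨l1, by omega, l3, ?_, ?_⟩
        · intro k hk1 hk2; exact l4 k hk1 hk2
        · intro k hk1 hk2
          by_cases hkm : k < mid
          · exact l5 k hk1 hkm
          · have := r5 k (by omega) hk2; omega
      · simp only [if_neg hge]
        refine ⟨by omega, r2, r3, ?_, ?_⟩
        · intro k hk1 hk2
          by_cases hkm : k < mid
          · have := l5 k hk1 hkm; omega
          · exact r4 k (by omega) hk2
        · intro k hk1 hk2
          by_cases hkm : k < mid
          · have := l5 k hk1 hkm; omega
          · exact r5 k (by omega) hk2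

-- ===== VERDICT (by name: the statement is the Claim_ definition above) =====
theorem maximumCalculation_spec : Claim_equal_maximumCalculation := by
  intro Input _ hpre
  obtain ⟨s, hs, hval⟩ := hpre
  have hne : Input ≠ [] := by rintro rfl; simp at hs
  have hv : revDecode s ∈ Input.map revDecode := List.mem_map_of_mem hs
  obtain ⟨m, i, hbest, hle⟩ := best_some_of_mem hv
  have hm10 : -10 < m := by omega
  set vals := Input.map revDecode with hvals
  have hlen : 0 < vals.length := by
    simp [hvals]
    exact List.length_pos_iff.mpr hne
  obtain ⟨hi, hival, hfirst⟩ := best_index hbest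
  obtain ⟨_, b2, b3, b4, b5⟩ := bestDC_spec vals vals.length 0 vals.length (le_refl _) hlen (le_refl _)
  -- uniqueness of the first maximum: bestDC vals 0 len = (m, i)
  have hmem : (bestDC vals 0 vals.length).1 ∈ vals := by
    rw [← b3, List.getD_eq_getElem vals 0 b2]
    exact List.getElem_mem _
  have hmm : (bestDC vals 0 vals.length).1 = m := by
    have h1 : (bestDC vals 0 vals.length).1 ≤ m := best_max hbest _ hmem
    have h2 : m ≤ (bestDC vals 0 vals.length).1 := by
      have := b5 i (by omega) hi
      rwa [List.getD_eq_getElem vals 0 hi, hival] at this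
    omega
  have hii : (bestDC vals 0 vals.length).2 = i := by
    by_contra hne'
    rcases Nat.lt_or_ge (bestDC vals 0 vals.length).2 i with hlt | hge
    · have := hfirst _ hlt
      rw [List.getD_eq_getElem vals 0 (by omega)] at b3
      omega
    · have hlt : i < (bestDC vals 0 vals.length).2 := by omega
      have := b4 i (by omega) hlt
      rw [List.getD_eq_getElem vals 0 hi, hival, hmm] at this
      omega
  unfold Spec_maximumCalculation maximumCalculation maximumCalculation_alt
  rw [mcLoop_eq_loopVals Input Input.length 0 (-10) 0 (by omega)]
  simp only [List.drop_zero, ← hvals]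
  rw [hmm, hii, loopVals_eq_best, hbest]
  simp [hm10]

@[simp] theorem maximumCalculation_raises : Claim_raises_maximumCalculation := by
  unfold Claim_raises_maximumCalculation
  refine ⟨?_, by decide, by decide, ?_⟩
  · rintro Input _ ⟨_, hall⟩ ⟨s, hs, hv⟩
    have := hall s hs
    omega
  · show maximumCalculation_alt ([" "]) = (-16, 0)
    simp only [maximumCalculation_alt]
    rw [show List.map revDecode ([" "]) = [(-16 : Int)] from by decide]
    rw [bestDC]
    decide
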